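-- pv_equiv track=rewrite | github.com/icosac/aoc2021 | day4/prova.py | organize_bingo_boards_into_keys
-- ===== SOURCE A (Python) =====
-- def get_arr_len(arr: list):
--     arr_len = 0
--     for _ in arr:
--         arr_len += 1
--     return arr_len
--
-- def organize_bingo_boards_into_keys(bingo_boards: list):
--     bingo_board_register = {}
--     board_dimension = get_arr_len(bingo_boards[0])
--     row_count = get_arr_len(bingo_boards)
--
--     row = 0
--     columns = board_dimension
--     column = 0
--     board_number = 0
--     board_count = int( row_count / board_dimension )
--     while board_number < board_count:
--         bingo_board_register[board_number] = []
--
--         while columns > column: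
--             bingo_board_register[board_number].append(bingo_boards[row])
--             column += 1
--             row += 1
--
--         board_number += 1
--         columns = get_arr_len(bingo_boards[0])
--         column = 0
--
--     return bingo_board_register
-- ===== SOURCE B (Python) =====
-- def organize_bingo_boards_into_keys(bingo_boards: list):
--     d = len(bingo_boards[0])
--     return {i: bingo_boards[i * d:(i + 1) * d]
--             for i in range(len(bingo_boards) // d)}
-- ===== Notes on version B (the rewrite author's own statement) =====
-- stated objective: simpler
-- what changed: Replaces the nested while loops with manual row/column/board counters (and the hand-rolled element-by-element length helper) by a single dict comprehension that slices each board's contiguous rows out of the flat list.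
import Mathlib
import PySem

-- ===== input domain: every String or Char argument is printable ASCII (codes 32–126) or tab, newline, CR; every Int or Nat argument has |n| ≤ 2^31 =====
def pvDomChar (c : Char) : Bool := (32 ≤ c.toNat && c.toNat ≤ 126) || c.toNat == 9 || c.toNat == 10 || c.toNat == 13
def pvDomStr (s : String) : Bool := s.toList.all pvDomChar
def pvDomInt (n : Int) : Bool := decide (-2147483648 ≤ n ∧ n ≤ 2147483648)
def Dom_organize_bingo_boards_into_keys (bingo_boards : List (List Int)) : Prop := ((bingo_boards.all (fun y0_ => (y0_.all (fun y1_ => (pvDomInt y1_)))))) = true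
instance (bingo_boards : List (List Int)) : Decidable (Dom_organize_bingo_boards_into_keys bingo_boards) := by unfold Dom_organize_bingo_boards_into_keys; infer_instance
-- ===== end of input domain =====

-- B replaces A's nested while loops with counters (and its element-counting length helper) by a
-- single dict comprehension over board indices that slices each board's rows out of the flat list
-- (objective: simpler).

-- ===== PORT A =====
-- get_arr_len: counts elements one by one
def pvGetArrLen {α : Type} (arr : List α) : Int := arr.foldl (fun n _ => n + 1) 0

-- inner 'while columns > column' loop; fuel = (columns - column), state (row, register);
-- bingo_boards[row] is ported as pyGetD with default [] (Pre_ guarantees the index is in range)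
def pvInnerA (bb : List (List Int)) (bn : Int) :
    Nat → Int → PySem.Dict Int (List (List Int)) → PySem.Dict Int (List (List Int)) × Int
  | 0, row, reg => (reg, row)
  | n+1, row, reg => pvInnerA bb bn n (row + 1) (reg.modify bn [] (· ++ [PySem.List.pyGetD bb row []]))

-- outer 'while board_number < board_count' loop; fuel = remaining boards
def pvOuterA (bb : List (List Int)) (d : Int) :
    Nat → Int → Int → PySem.Dict Int (List (List Int)) → PySem.Dict Int (List (List Int))
  | 0, _, _, reg => reg
  | k+1, bn, row, reg =>
      let reg1 := reg.insert bn []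
      let p := pvInnerA bb bn d.toNat row reg1
      pvOuterA bb d k (bn + 1) p.2 p.1

def organize_bingo_boards_into_keys (bingo_boards : List (List Int)) : List (Int × List (List Int)) :=
  let board_dimension := pvGetArrLen (PySem.List.pyGetD bingo_boards 0 [])  -- bingo_boards[0]; [] raises IndexError, excluded by Pre_
  let row_count := pvGetArrLen bingo_boards
  let board_count := PySem.Int.truncdiv row_count board_dimension  -- int(row_count / board_dimension); /0 excluded by Pre_
  (pvOuterA bingo_boards board_dimension board_count.toNat 0 0 PySem.Dict.empty).items

-- ===== PORT B =====
def organize_bingo_boards_into_keys_alt (bingo_boards : List (List Int)) : List (Int × List (List Int)) :=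
  let d : Int := (PySem.List.pyGetD bingo_boards 0 []).length  -- len(bingo_boards[0])
  (PySem.List.pyRange 0 (PySem.Int.floordiv (bingo_boards.length : Int) d) 1).map
    (fun i => (i, PySem.List.slice bingo_boards (some (i * d)) (some ((i + 1) * d))))

-- ===== PRECONDITION & SPEC =====
-- Pre_ excludes exactly the inputs where the Python A raises: the empty list (IndexError on
-- bingo_boards[0]) and a list whose first row is empty (ZeroDivisionError).
def Pre_organize_bingo_boards_into_keys (bingo_boards : List (List Int)) : Prop :=
  bingo_boards ≠ [] ∧ bingo_boards.headD [] ≠ []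
instance (bingo_boards : List (List Int)) : Decidable (Pre_organize_bingo_boards_into_keys bingo_boards) := by unfold Pre_organize_bingo_boards_into_keys; infer_instance

def pvWitness_organize_bingo_boards_into_keys : List (List Int) := [[1, 2], [3, 4], [5, 6], [7, 8]]

def Spec_organize_bingo_boards_into_keys (bingo_boards : List (List Int)) (out : List (Int × List (List Int))) : Prop := out = organize_bingo_boards_into_keys_alt bingo_boards
instance (bingo_boards : List (List Int)) (out : List (Int × List (List Int))) : Decidable (Spec_organize_bingo_boards_into_keys bingo_boards out) := by unfold Spec_organize_bingo_boards_into_keys; infer_instance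

-- ===== CLAIM (what is proved, stated in full; the proofs are below) =====
def Claim_equal_organize_bingo_boards_into_keys : Prop := ∀ (bingo_boards : List (List Int)), Dom_organize_bingo_boards_into_keys bingo_boards → Pre_organize_bingo_boards_into_keys bingo_boards → Spec_organize_bingo_boards_into_keys bingo_boards (organize_bingo_boards_into_keys bingo_boards)

-- ===== LEMMAS AND PROOFS =====

theorem pvGetArrLen_eq {α : Type} (arr : List α) : pvGetArrLen arr = (arr.length : Int) := by
  have h : ∀ (l : List α) (c : Int), l.foldl (fun n _ => n + 1) c = c + l.length := by
    intro l
    induction l with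
    | nil => simp
    | cons x xs ih => intro c; simp only [List.foldl_cons, ih, List.length_cons]; push_cast; ring
  simpa [pvGetArrLen] using h arr 0

theorem pvGet?_last (R : List (Int × List (List Int))) (bn : Int) (v : List (List Int))
    (hR : ∀ p ∈ R, (p.1 == bn) = false) :
    (PySem.Dict.mk (R ++ [(bn, v)])).get? bn = some v := by
  induction R with
  | nil => simp [PySem.Dict.get?_mk_cons]
  | cons p R ih =>
    rw [List.cons_append, PySem.Dict.get?_mk_cons, hR p (by simp)]
    simpa using ih (fun q hq => hR q (by simp [hq]))

theorem pvGet?_none (R : List (Int × List (List Int))) (bn : Int)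
    (hR : ∀ p ∈ R, (p.1 == bn) = false) :
    (PySem.Dict.mk R).get? bn = none := by
  induction R with
  | nil => rfl
  | cons p R ih =>
    rw [PySem.Dict.get?_mk_cons, hR p (by simp)]
    simpa using ih (fun q hq => hR q (by simp [hq]))

theorem pvModify_last (R : List (Int × List (List Int))) (bn : Int) (v : List (List Int))
    (f : List (List Int) → List (List Int)) (hR : ∀ p ∈ R, (p.1 == bn) = false) :
    (PySem.Dict.mk (R ++ [(bn, v)])).modify bn [] f = PySem.Dict.mk (R ++ [(bn, f v)]) := by
  have hg := pvGet?_last R bn v hR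
  have hc : (PySem.Dict.mk (R ++ [(bn, v)])).contains bn = true := by
    rw [PySem.Dict.contains_eq_isSome_get?, hg]; rfl
  rw [PySem.Dict.modify, PySem.Dict.getD_eq_get?_getD, hg, Option.getD_some]
  apply PySem.Dict.ext
  rw [PySem.Dict.items_insert_of_contains _ _ hc]
  show List.map _ (R ++ [(bn, v)]) = _
  rw [List.map_append]
  have h1 : List.map (fun p => if (p.1 == bn) = true then (bn, f v) else p) R = R := by
    rw [List.map_congr_left (g := id) (fun p hp => by simp [hR p hp]), List.map_id]
  rw [h1]
  simp

theorem pvInsert_fresh (R : List (Int × List (List Int))) (bn : Int) (v : List (List Int))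
    (hR : ∀ p ∈ R, (p.1 == bn) = false) :
    (PySem.Dict.mk R).insert bn v = PySem.Dict.mk (R ++ [(bn, v)]) := by
  have hc : (PySem.Dict.mk R).contains bn = false := by
    rw [PySem.Dict.contains_eq_isSome_get?, pvGet?_none R bn hR]; rfl
  apply PySem.Dict.ext
  rw [PySem.Dict.items_insert_of_not_contains _ _ hc]

-- the inner loop appends the next n rows to the (last-positioned) entry bn and advances row by n
theorem pvInnerA_eq (bb : List (List Int)) (bn : Int) (R : List (Int × List (List Int)))
    (hR : ∀ p ∈ R, (p.1 == bn) = false) (n : Nat) :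
    ∀ (row : Int) (v : List (List Int)),
    pvInnerA bb bn n row (PySem.Dict.mk (R ++ [(bn, v)])) =
      (PySem.Dict.mk (R ++ [(bn, v ++ (List.range n).map (fun (j : Nat) => PySem.List.pyGetD bb (row + (j : Int)) []))]), row + (n : Int)) := by
  induction n with
  | zero => intro row v; simp [pvInnerA]
  | succ n ih =>
    intro row v
    show pvInnerA bb bn n (row + 1) ((PySem.Dict.mk (R ++ [(bn, v)])).modify bn [] _) = _
    rw [pvModify_last R bn v _ hR, ih (row + 1) (v ++ [PySem.List.pyGetD bb row []])]
    have hlist : (v ++ [PySem.List.pyGetD bb row []]) ++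
        (List.range n).map (fun (j : Nat) => PySem.List.pyGetD bb (row + 1 + (j : Int)) []) =
        v ++ (List.range (n + 1)).map (fun (j : Nat) => PySem.List.pyGetD bb (row + (j : Int)) []) := by
      rw [List.range_succ_eq_map, List.map_cons, List.map_map, List.append_assoc, List.singleton_append]
      simp only [Nat.cast_zero, add_zero]
      congr 2
      apply List.map_congr_left
      intro j _
      have : row + 1 + (j : Int) = row + ((j + 1 : Nat) : Int) := by push_cast; ring
      simp [Function.comp, this]
    rw [hlist]
    have hrow : row + 1 + (n : Int) = row + ((n + 1 : Nat) : Int) := by push_cast; ring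
    rw [hrow]

-- the outer loop appends one (board index, board) pair per remaining board
theorem pvOuterA_eq (bb : List (List Int)) (dn : Nat) (k : Nat) :
    ∀ (bn : Int) (row : Int) (R : List (Int × List (List Int))), (∀ p ∈ R, p.1 < bn) →
    pvOuterA bb (dn : Int) k bn row (PySem.Dict.mk R) =
      PySem.Dict.mk (R ++ (List.range k).map
        (fun (i : Nat) => ((bn + (i : Int), (List.range dn).map (fun (j : Nat) => PySem.List.pyGetD bb (row + ((i * dn : Nat) : Int) + (j : Int)) [])) : Int × List (List Int)))) := by
  induction k with
  | zero => intro bn row R _; simp [pvOuterA]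
  | succ k ih =>
    intro bn row R hR
    have hfresh : ∀ p ∈ R, (p.1 == bn) = false := by
      intro p hp; simpa using Int.ne_of_lt (hR p hp)
    show pvOuterA bb (dn : Int) k (bn + 1) _ _ = _
    rw [pvInsert_fresh R bn [] hfresh, Int.toNat_natCast,
        pvInnerA_eq bb bn R hfresh dn row]
    rw [ih (bn + 1) (row + (dn : Int)) (R ++ [(bn, _)])
        (by intro p hp
            rcases List.mem_append.mp hp with h | h
            · exact lt_trans (hR p h) (by omega)
            · rcases List.mem_singleton.mp h with rfl; simp)]
    rw [List.append_assoc]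
    refine congrArg PySem.Dict.mk (congrArg (R ++ ·) ?_)
    rw [List.range_succ_eq_map, List.map_cons, List.map_map, List.singleton_append, List.nil_append]
    refine congr_arg₂ List.cons ?_ ?_
    · simp
    · apply List.map_congr_left
      intro i _
      have h1 : bn + 1 + (i : Int) = bn + ((i + 1 : Nat) : Int) := by push_cast; ring
      have h2 : ∀ j : Nat, row + (dn : Int) + ((i * dn : Nat) : Int) + (j : Int)
          = row + (((i + 1) * dn : Nat) : Int) + (j : Int) := by intro j; push_cast; ring
      simp only [Function.comp_apply, h1]
      congr 1
      exact List.map_congr_left (fun j _ => by rw [h2 j])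

-- a board's rows, listed element by element, are the corresponding slice
theorem pvWindow_eq_slice (bb : List (List Int)) (dn i : Nat) (h : (i + 1) * dn ≤ bb.length) :
    (List.range dn).map (fun (j : Nat) => PySem.List.pyGetD bb (((i * dn : Nat) : Int) + (j : Int)) []) =
      (bb.drop (i * dn)).take dn := by
  have h' : i * dn + dn ≤ bb.length := by rw [Nat.succ_mul] at h; exact h
  apply List.ext_getElem
  · simp; omega
  · intro j hj1 hj2
    have hj : j < dn := by simpa using hj1
    simp only [List.getElem_map, List.getElem_range]
    have hcast : ((i * dn : Nat) : Int) + ((j : Nat) : Int) = ((i * dn + j : Nat) : Int) := by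
      push_cast; ring
    rw [hcast, PySem.List.pyGetD_natCast]
    have hlt : i * dn + j < bb.length := by omega
    rw [List.getD_eq_getElem _ _ hlt]
    simp [List.getElem_take, List.getElem_drop]

-- ===== VERDICT (by name: the statement is the Claim_ definition above) =====
theorem organize_bingo_boards_into_keys_spec : Claim_equal_organize_bingo_boards_into_keys := by
  intro bb _ hpre
  obtain ⟨hne, hhd⟩ := hpre
  cases bb with
  | nil => exact absurd rfl hne
  | cons a t =>
    show organize_bingo_boards_into_keys (a :: t) = organize_bingo_boards_into_keys_alt (a :: t)
    have hd : 0 < a.length := by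
      cases a with
      | nil => exact absurd rfl hhd
      | cons x xs => simp
    have htd : ∀ (m k : Nat), PySem.Int.truncdiv (m : Int) (k : Int) = ((m / k : Nat) : Int) := by
      intro m k; simp [PySem.Int.truncdiv]
    simp only [organize_bingo_boards_into_keys, organize_bingo_boards_into_keys_alt,
      PySem.List.pyGetD_zero_cons, pvGetArrLen_eq, htd, Int.toNat_natCast,
      PySem.Int.floordiv_natCast, PySem.List.pyRange_zero_natCast]
    rw [show (PySem.Dict.empty : PySem.Dict Int (List (List Int))) = PySem.Dict.mk [] from rfl]
    rw [pvOuterA_eq (a :: t) a.length ((a :: t).length / a.length) 0 0 [] (by simp)]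
    show List.map _ _ = _
    rw [List.map_map]
    apply List.map_congr_left
    intro i hi
    have hi' : i < (a :: t).length / a.length := List.mem_range.mp hi
    have hbound : (i + 1) * a.length ≤ (a :: t).length := by
      calc (i + 1) * a.length ≤ ((a :: t).length / a.length) * a.length :=
            Nat.mul_le_mul_right _ hi'
        _ ≤ (a :: t).length := Nat.div_mul_le_self _ _
    have hsl : PySem.List.slice (a :: t) (some ((i : Int) * (a.length : Int)))
        (some (((i : Int) + 1) * (a.length : Int)))
        = ((a :: t).drop (i * a.length)).take a.length := by
      have e1 : (i : Int) * (a.length : Int) = ((i * a.length : Nat) : Int) := by push_cast; ring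
      have e2 : ((i : Int) + 1) * (a.length : Int)
          = ((i * a.length : Nat) : Int) + ((a.length : Nat) : Int) := by push_cast; ring
      rw [e1, e2, PySem.List.slice_natCast_add]
    simp only [Function.comp_apply, zero_add, hsl]
    rw [← pvWindow_eq_slice (a :: t) a.length i hbound]
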